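-- pv_equiv track=rewrite | github.com/Deployia/deployio | ai-service/engines/utils/github_client.py | _is_key_file
-- ===== SOURCE A (Python) =====
-- def _is_key_file(file_path: str) -> bool:
--     """Check if file is important for technology detection"""
--     key_files = {
--         # Package managers
--         "package.json",
--         "package-lock.json",
--         "yarn.lock",
--         "requirements.txt",
--         "setup.py",
--         "pyproject.toml",
--         "pipfile",
--         "pom.xml",
--         "build.gradle",
--         "build.gradle.kts",
--         "composer.json",
--         "gemfile",
--         "cargo.toml",
--         "go.mod",
--         # Configuration files
--         "dockerfile",
--         "docker-compose.yml",
--         "docker-compose.yaml",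
--         ".gitignore",
--         ".env",
--         ".env.example",
--         "makefile",
--         "rakefile",
--         "gulpfile.js",
--         "webpack.config.js",
--         "vite.config.js",
--         "rollup.config.js",
--         "tsconfig.json",
--         # Framework-specific
--         "next.config.js",
--         "nuxt.config.js",
--         "vue.config.js",
--         "angular.json",
--         "ember-cli-build.js",
--         "django/settings.py",
--         "manage.py",
--         "wsgi.py",
--         "app.py",
--         "main.py",
--         "server.js",
--         "index.js",
--         # Documentation
--         "readme.md",
--         "readme.txt",
--         "changelog.md",
--     }
--
--     filename = file_path.lower()
--     return any(key in filename for key in key_files)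
-- ===== SOURCE B (Python) =====
-- # B: first-character index + single left-to-right walk with early exit.
-- # Keys are pre-grouped by first character (stored as their tails), so each
-- # position of the lowered path only tests the few keys starting with that
-- # character, instead of A's one full substring scan per key.
-- _TAILS_BY_FIRST = {
--     'p': ('ackage.json', 'ackage-lock.json', 'yproject.toml', 'ipfile', 'om.xml'),
--     'y': ('arn.lock',),
--     'r': ('equirements.txt', 'akefile', 'ollup.config.js', 'eadme.md', 'eadme.txt'),
--     's': ('etup.py', 'erver.js'),
--     'b': ('uild.gradle', 'uild.gradle.kts'),
--     'c': ('omposer.json', 'argo.toml', 'hangelog.md'),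
--     'g': ('emfile', 'o.mod', 'ulpfile.js'),
--     'd': ('ockerfile', 'ocker-compose.yml', 'ocker-compose.yaml', 'jango/settings.py'),
--     '.': ('gitignore', 'env', 'env.example'),
--     'm': ('akefile', 'anage.py', 'ain.py'),
--     'w': ('ebpack.config.js', 'sgi.py'),
--     'v': ('ite.config.js', 'ue.config.js'),
--     't': ('sconfig.json',),
--     'n': ('ext.config.js', 'uxt.config.js'),
--     'a': ('ngular.json', 'pp.py'),
--     'e': ('mber-cli-build.js',),
--     'i': ('ndex.js',),
-- }
--
-- def _is_key_file(file_path: str) -> bool: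
--     s = file_path.lower()
--     for i, c in enumerate(s):
--         for tail in _TAILS_BY_FIRST.get(c, ()):
--             if s.startswith(tail, i + 1):
--                 return True
--     return False
-- ===== Notes on version B (the rewrite author's own statement) =====
-- stated objective: alternative
-- what changed: A performs one full substring scan of the lowered path per key; B pre-groups the key tails in a dict indexed by first character and makes a single left-to-right walk with early exit, testing at each position only the few keys that start with that character.
import Mathlib
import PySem

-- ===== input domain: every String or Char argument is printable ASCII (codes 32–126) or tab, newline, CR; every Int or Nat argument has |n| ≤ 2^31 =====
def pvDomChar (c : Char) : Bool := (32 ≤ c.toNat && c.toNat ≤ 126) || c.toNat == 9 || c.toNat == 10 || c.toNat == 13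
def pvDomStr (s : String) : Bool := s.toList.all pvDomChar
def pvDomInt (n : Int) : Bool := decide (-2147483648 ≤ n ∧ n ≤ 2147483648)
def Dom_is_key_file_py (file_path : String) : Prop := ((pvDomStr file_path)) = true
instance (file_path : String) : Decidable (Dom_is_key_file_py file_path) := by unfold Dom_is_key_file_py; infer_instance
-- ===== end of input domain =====

-- B replaces A's key-major substring scans ('key in filename' once per key) by a single
-- left-to-right walk dispatching through a first-character index of key tails; alternative structure, no speed claim.

-- ===== PORT A =====
-- the literal key-file set of the Python source (a Python set of distinct literals; order irrelevant for `any`)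
def keyFiles : List String := [
  "package.json", "package-lock.json", "yarn.lock", "requirements.txt",
  "setup.py", "pyproject.toml", "pipfile", "pom.xml", "build.gradle",
  "build.gradle.kts", "composer.json", "gemfile", "cargo.toml", "go.mod",
  "dockerfile", "docker-compose.yml", "docker-compose.yaml", ".gitignore",
  ".env", ".env.example", "makefile", "rakefile", "gulpfile.js",
  "webpack.config.js", "vite.config.js", "rollup.config.js", "tsconfig.json",
  "next.config.js", "nuxt.config.js", "vue.config.js", "angular.json",
  "ember-cli-build.js", "django/settings.py", "manage.py", "wsgi.py",
  "app.py", "main.py", "server.js", "index.js", "readme.md", "readme.txt",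
  "changelog.md"]

def is_key_file_py (file_path : String) : Bool :=
  let filename := PySem.Str.lower file_path
  keyFiles.any (fun key => PySem.Str.isIn key filename)

-- ===== PORT B =====
-- Source B's module-level `_TAILS_BY_FIRST`: key tails grouped by the key's first character
def tailsByFirst : PySem.Dict Char (List String) := PySem.Dict.ofList [
  ('p', ["ackage.json", "ackage-lock.json", "yproject.toml", "ipfile", "om.xml"]),
  ('y', ["arn.lock"]),
  ('r', ["equirements.txt", "akefile", "ollup.config.js", "eadme.md", "eadme.txt"]),
  ('s', ["etup.py", "erver.js"]),
  ('b', ["uild.gradle", "uild.gradle.kts"]),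
  ('c', ["omposer.json", "argo.toml", "hangelog.md"]),
  ('g', ["emfile", "o.mod", "ulpfile.js"]),
  ('d', ["ockerfile", "ocker-compose.yml", "ocker-compose.yaml", "jango/settings.py"]),
  ('.', ["gitignore", "env", "env.example"]),
  ('m', ["akefile", "anage.py", "ain.py"]),
  ('w', ["ebpack.config.js", "sgi.py"]),
  ('v', ["ite.config.js", "ue.config.js"]),
  ('t', ["sconfig.json"]),
  ('n', ["ext.config.js", "uxt.config.js"]),
  ('a', ["ngular.json", "pp.py"]),
  ('e', ["mber-cli-build.js"]),
  ('i', ["ndex.js"])]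

-- Source B's `for i, c in enumerate(s): for tail in _TAILS_BY_FIRST.get(c, ()): if s.startswith(tail, i+1): return True`
-- ported as structural recursion over the character list (the suffix at position i)
def goAlt : List Char → Bool
  | [] => false
  | c :: rest =>
    if (tailsByFirst.getD c []).any (fun t => PySem.Chars.startswith rest t.toList) then true
    else goAlt rest

def is_key_file_py_alt (file_path : String) : Bool :=
  goAlt (PySem.Str.lower file_path).toList

-- ===== PRECONDITION & SPEC =====
def Spec_is_key_file_py (file_path : String) (out : Bool) : Prop := out = is_key_file_py_alt file_path
instance (file_path : String) (out : Bool) : Decidable (Spec_is_key_file_py file_path out) := by unfold Spec_is_key_file_py; infer_instance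

-- ===== CLAIM (what is proved, stated in full; the proofs are below) =====
def Claim_equal_is_key_file_py : Prop := ∀ (file_path : String), Dom_is_key_file_py file_path → Spec_is_key_file_py file_path (is_key_file_py file_path)

-- ===== LEMMAS AND PROOFS =====

-- every (first char, tail) entry of the index reassembles to a key of A's list
theorem tails_sound : ∀ p ∈ tailsByFirst.items, ∀ t ∈ p.2,
    String.ofList (p.1 :: t.toList) ∈ keyFiles := by decide

theorem keyFiles_ne_nil : ∀ k ∈ keyFiles, k.toList ≠ [] := by decide

-- every key's tail is indexed under its first character
theorem tails_complete : ∀ k ∈ keyFiles,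
    String.ofList k.toList.tail ∈ tailsByFirst.getD (k.toList.headD ' ') [] := by decide

-- the walk finds exactly the keys occurring as a prefix of some suffix
theorem goAlt_eq_true_iff (l : List Char) :
    goAlt l = true ↔ ∃ k ∈ keyFiles, ∃ i, k.toList <+: l.drop i := by
  induction l with
  | nil =>
    simp only [goAlt, Bool.false_eq_true, false_iff]
    rintro ⟨k, hk, i, hpre⟩
    rw [List.drop_nil, List.prefix_nil] at hpre
    exact keyFiles_ne_nil k hk hpre
  | cons c rest ih =>
    simp only [goAlt]
    split_ifs with h
    · simp only [true_iff]
      obtain ⟨t, ht, hs⟩ := List.any_eq_true.mp h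
      have hmem : t ∈ (tailsByFirst.get? c).getD [] := by
        rwa [← PySem.Dict.getD_eq_get?_getD]
      cases hg : tailsByFirst.get? c with
      | none => rw [hg] at hmem; exact absurd hmem (List.not_mem_nil)
      | some v =>
        rw [hg] at hmem
        have hit := PySem.Dict.mem_items_of_get?_eq_some _ hg
        refine ⟨String.ofList (c :: t.toList), tails_sound (c, v) hit t hmem, 0, ?_⟩
        simp only [List.drop_zero]
        have : (c :: t.toList) <+: (c :: rest) :=
          List.cons_prefix_cons.mpr ⟨rfl, (PySem.Chars.startswith_iff _ _).mp hs⟩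
        simpa using this
    · rw [ih]
      constructor
      · rintro ⟨k, hk, i, hpre⟩
        exact ⟨k, hk, i + 1, by simpa using hpre⟩
      · rintro ⟨k, hk, i, hpre⟩
        cases i with
        | zero =>
          exfalso; apply h
          simp only [List.drop_zero] at hpre
          have hc := tails_complete k hk
          cases hkl : k.toList with
          | nil => exact absurd hkl (keyFiles_ne_nil k hk)
          | cons c' ts =>
            rw [hkl] at hc hpre
            simp only [List.tail_cons, List.headD_cons] at hc
            obtain ⟨hce, hts⟩ := List.cons_prefix_cons.mp hpre
            subst hce
            refine List.any_eq_true.mpr ⟨String.ofList ts, hc, ?_⟩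
            exact (PySem.Chars.startswith_iff _ _).mpr (by simpa using hts)
        | succ j => exact ⟨k, hk, j, by simpa using hpre⟩

theorem is_key_file_py_spec : Claim_equal_is_key_file_py := by
  intro file_path _
  unfold Spec_is_key_file_py is_key_file_py is_key_file_py_alt
  rw [Bool.eq_iff_iff, goAlt_eq_true_iff]
  simp only [List.any_eq_true, PySem.Str.isIn_iff_infix]
  constructor
  · rintro ⟨k, hk, hin⟩
    obtain ⟨i, hpre⟩ := (PySem.Chars.exists_prefix_drop_iff_isIn _ _).mpr
      ((PySem.Chars.isIn_iff_infix _ _).mpr hin)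
    exact ⟨k, hk, i, hpre⟩
  · rintro ⟨k, hk, i, hpre⟩
    exact ⟨k, hk, (PySem.Chars.isIn_iff_infix _ _).mp
      ((PySem.Chars.exists_prefix_drop_iff_isIn _ _).mp ⟨i, hpre⟩)⟩
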